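-- pv_equiv track=rewrite | github.com/TYjacoby71/BatchTrack | app/services/lineage_service.py | _pick_unique_prefix
-- ===== SOURCE A (Python) =====
-- from typing import Iterable, List, Optional, Set
--
-- def _pick_unique_prefix(candidates: List[str], existing: Set[str]) -> str:
--     for candidate in candidates:
--         if candidate not in existing:
--             return candidate
--
--     base = candidates[0] if candidates else "RCP"
--     index = 1
--     while True:
--         candidate = f"{base}{index}"
--         if candidate not in existing:
--             return candidate
--         index += 1
-- ===== SOURCE B (Python) =====
-- from typing import List, Set
--
--
-- def _pick_unique_prefix(candidates: List[str], existing: Set[str]) -> str: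
--     unused = [c for c in candidates if c not in existing]
--     if unused:
--         return unused[0]
--     base = candidates[0] if candidates else "RCP"
--     # All suffixes of existing names that extend base, in numeric-friendly order:
--     # the key (len(t), t) orders the decimal strings "1","2",...,"10",... numerically.
--     tails = sorted({s[len(base):] for s in existing if s.startswith(base)},
--                    key=lambda t: (len(t), t))
--     # One sorted scan finds the first index i whose decimal string is missing.
--     i = 1
--     for t in tails:
--         s = str(i)
--         if t == s:
--             i += 1
--         elif (len(t), t) > (len(s), s):
--             break
--     return f"{base}{i}"
-- ===== Notes on version B (the rewrite author's own statement) =====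
-- stated objective: alternative
-- what changed: Replaces A's unbounded while-True probing of f'{base}{index}' by membership tests with a sorted-gap scan: B collects the suffixes of existing entries that extend base, sorts them once under the numeric-order key (len(t), t), and walks the sorted list to the first gap; the candidate phase becomes filter-then-first instead of an early-return loop.
import Mathlib
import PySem

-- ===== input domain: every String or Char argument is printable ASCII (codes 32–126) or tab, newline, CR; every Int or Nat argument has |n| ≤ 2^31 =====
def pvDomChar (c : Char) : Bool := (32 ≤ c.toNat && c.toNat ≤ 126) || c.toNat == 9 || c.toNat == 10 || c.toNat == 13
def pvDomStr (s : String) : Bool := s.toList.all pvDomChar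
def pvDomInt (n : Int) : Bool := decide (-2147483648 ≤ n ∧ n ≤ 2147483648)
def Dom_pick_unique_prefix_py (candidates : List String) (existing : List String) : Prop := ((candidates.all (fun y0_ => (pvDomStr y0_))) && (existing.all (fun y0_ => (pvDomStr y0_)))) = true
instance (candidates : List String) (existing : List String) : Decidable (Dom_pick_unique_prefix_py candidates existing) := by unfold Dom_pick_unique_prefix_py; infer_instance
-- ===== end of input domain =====

-- B replaces A's unbounded while-True probing of base+str(index) by one sorted-gap scan over the
-- suffixes of existing entries extending base, ordered by the numeric key (len(t), t)
-- (objective: alternative algorithm, same result).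

-- ===== PORT A =====
-- 'for candidate in candidates: if candidate not in existing: return candidate'
def pickA_for (existing : List String) : List String → Option String
  | [] => none
  | c :: cs => if !(PySem.Set.contains existing c) then some c else pickA_for existing cs

-- 'while True: candidate = f"{base}{index}"; if candidate not in existing: return candidate; index += 1'
-- fuel only makes the loop total; the call below passes existing.length + 1, which is proved sufficient
-- (the fuel-0 branch is never reached), so this computes exactly what the Python loop computes.
def pickA_while (base : String) (existing : List String) : Nat → Nat → String
  | 0, index => base ++ PySem.Int.toStr (index : Int)
  | fuel + 1, index =>
    let candidate := base ++ PySem.Int.toStr (index : Int)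
    if !(PySem.Set.contains existing candidate) then candidate
    else pickA_while base existing fuel (index + 1)

def pick_unique_prefix_py (candidates : List String) (existing : List String) : String :=
  match pickA_for existing candidates with
  | some c => c
  | none =>
      let base := match candidates with | [] => "RCP" | c :: _ => c
      pickA_while base existing (existing.length + 1) 1

-- ===== PORT B =====
-- '{s[len(base):] for s in existing if s.startswith(base)}' (before the set() dedup)
def pickB_suffixes (base : String) (existing : List String) : List String :=
  (existing.filter (fun s => PySem.Str.startswith s base)).map
    (fun s => PySem.Str.slice s (some (PySem.Str.len base)) none)

-- 'i = 1; for t in tails: s = str(i); if t == s: i += 1; elif (len(t), t) > (len(s), s): break'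
-- the Python tuple comparison (len(t), t) > (len(s), s) is ported by hand as the exact
-- lexicographic disjunction on (length, string); it is exact (String '<' is code-point order).
def pickB_mex : List String → Int → Int
  | [], i => i
  | t :: ts, i =>
    let s := PySem.Int.toStr i
    if t = s then pickB_mex ts (i + 1)
    else if PySem.Str.len s < PySem.Str.len t ∨ (PySem.Str.len t = PySem.Str.len s ∧ s < t) then i
    else pickB_mex ts i

def pick_unique_prefix_py_alt (candidates : List String) (existing : List String) : String :=
  -- 'unused = [c for c in candidates if c not in existing]; if unused: return unused[0]'
  match candidates.filter (fun c => !(PySem.Set.contains existing c)) with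
  | fresh :: _ => fresh
  | [] =>
      let base := match candidates with | [] => "RCP" | c :: _ => c
      -- tails = sorted({…}, key=lambda t: (len(t), t)); the key is injective, so the sort
      -- of the set does not depend on set-iteration order
      let tails := PySem.List.sorted2 (PySem.Set.ofList (pickB_suffixes base existing))
        (fun t => PySem.Str.len t) (fun t => t) false
      base ++ PySem.Int.toStr (pickB_mex tails 1)

-- ===== PRECONDITION & SPEC =====
def Spec_pick_unique_prefix_py (candidates : List String) (existing : List String) (out : String) : Prop := out = pick_unique_prefix_py_alt candidates existing
instance (candidates : List String) (existing : List String) (out : String) : Decidable (Spec_pick_unique_prefix_py candidates existing out) := by unfold Spec_pick_unique_prefix_py; infer_instance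

-- ===== CLAIM (what is proved, stated in full; the proofs are below) =====
def Claim_equal_pick_unique_prefix_py : Prop := ∀ (candidates : List String) (existing : List String), Dom_pick_unique_prefix_py candidates existing → Spec_pick_unique_prefix_py candidates existing (pick_unique_prefix_py candidates existing)

-- ===== LEMMAS AND PROOFS =====

-- the sort key used throughout the proof: Python's (len(t), t), lexicographically
def pvKey (t : String) : Lex (Int × String) := toLex (PySem.Str.len t, t)

theorem pvKey_inj (s t : String) (h : pvKey s = pvKey t) : s = t := by
  have := congrArg (fun k => (ofLex k).2) h
  simpa [pvKey] using this

-- A's for-loop returns the head of B's filtered list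
theorem pickA_for_eq_filter (existing : List String) (cs : List String) :
    pickA_for existing cs = (cs.filter (fun c => !(PySem.Set.contains existing c))).head? := by
  induction cs with
  | nil => rfl
  | cons c cs ih =>
      rw [pickA_for, List.filter_cons]
      cases hc : PySem.Set.contains existing c <;> simp [ih]

-- strings: base is a prefix of base ++ t
theorem startswith_append (base t : String) : PySem.Str.startswith (base ++ t) base = true := by
  simp [PySem.Str.startswith, PySem.Chars.startswith, List.isPrefixOf_iff_prefix,
    String.toList_append, List.prefix_append]

-- strings: (base ++ t)[len(base):] = t
theorem slice_append (base t : String) :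
    PySem.Str.slice (base ++ t) (some (PySem.Str.len base)) none = t := by
  apply String.toList_inj.mp
  rw [PySem.Str.toList_slice, PySem.Chars.slice, PySem.Str.len_eq,
    PySem.List.slice_from_natCast, String.toList_append, List.drop_left]

-- strings: startswith s base → base ++ s[len(base):] = s
theorem append_slice_of_startswith (base s : String) (h : PySem.Str.startswith s base = true) :
    base ++ PySem.Str.slice s (some (PySem.Str.len base)) none = s := by
  simp only [PySem.Str.startswith, PySem.Chars.startswith, List.isPrefixOf_iff_prefix] at h
  obtain ⟨r, hr⟩ := h
  apply String.toList_inj.mp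
  rw [String.toList_append, PySem.Str.toList_slice, PySem.Chars.slice, PySem.Str.len_eq,
    PySem.List.slice_from_natCast, ← hr, List.drop_left]

-- the suffix list B builds contains exactly the t with base ++ t in existing
theorem mem_suffixes_iff (base : String) (existing : List String) (t : String) :
    t ∈ pickB_suffixes base existing ↔ (base ++ t) ∈ existing := by
  rw [pickB_suffixes, List.mem_map]
  constructor
  · rintro ⟨s, hs, rfl⟩
    rw [List.mem_filter] at hs
    rw [append_slice_of_startswith base s hs.2]
    exact hs.1
  · intro h
    exact ⟨base ++ t, List.mem_filter.mpr ⟨h, startswith_append base t⟩, slice_append base t⟩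

-- sorted2 with two keys is sorted with the lexicographic combined key
theorem sorted2_eq_sorted {α κ₁ κ₂ : Type} [LinearOrder κ₁] [LinearOrder κ₂]
    (xs : List α) (k1 : α → κ₁) (k2 : α → κ₂) :
    PySem.List.sorted2 xs k1 k2 false
      = PySem.List.sorted xs (fun x => toLex (k1 x, k2 x)) false := by
  rw [PySem.List.sorted_eq_foldl_insertBy, PySem.List.sorted2]
  simp only [if_neg (by decide : ¬ (false = true))]
  have hbe : (fun a b : α => decide (k1 a < k1 b) || (!decide (k1 b < k1 a) && decide (k2 a < k2 b)))
      = fun a b : α => decide (toLex (k1 a, k2 a) < toLex (k1 b, k2 b)) := by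
    funext a b
    rw [Bool.eq_iff_iff]
    simp only [Bool.or_eq_true, Bool.and_eq_true, Bool.not_eq_true', decide_eq_true_eq,
      decide_eq_false_iff_not, Prod.Lex.lt_iff, ofLex_toLex, not_lt]
    constructor
    · rintro (h | ⟨h, h2⟩)
      · exact Or.inl h
      · rcases lt_or_eq_of_le h with h' | h'
        · exact Or.inl h'
        · exact Or.inr ⟨h', h2⟩
    · rintro (h | ⟨h, h2⟩)
      · exact Or.inl h
      · exact Or.inr ⟨le_of_eq h, h2⟩
  rw [hbe]

-- digit characters of digits below 10 compare like the digits
theorem digitChar_lt (m n : Nat) (hm : m < 10) (hn : n < 10) (h : m < n) :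
    Nat.digitChar m < Nat.digitChar n := by
  interval_cases m <;> interval_cases n <;> revert h <;> decide

-- lex on char lists: common strict prefix of equal length decides
theorem list_lt_append_of_lt (l1 l2 r1 r2 : List Char) (h : l1 < l2)
    (hlen : l1.length = l2.length) : l1 ++ r1 < l2 ++ r2 := by
  induction l1 generalizing l2 with
  | nil =>
      cases l2 with
      | nil => simp at h
      | cons _ _ => simp at hlen
  | cons c l ih =>
      cases l2 with
      | nil => simp at hlen
      | cons d l2 =>
        rw [List.cons_lt_cons_iff] at h
        rcases h with h | ⟨rfl, h⟩
        · simp [List.cons_lt_cons_iff, h]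
        · simp only [List.length_cons, Nat.add_right_cancel_iff] at hlen
          exact List.cons_lt_cons_iff.mpr (Or.inr ⟨rfl, ih _ h hlen⟩)

-- lex on char lists: equal prefix, compare the rest
theorem list_lt_append_left (l r1 r2 : List Char) (h : r1 < r2) : l ++ r1 < l ++ r2 := by
  induction l with
  | nil => simpa
  | cons c l ih => exact List.cons_lt_cons_iff.mpr (Or.inr ⟨rfl, ih⟩)

-- decimal length is monotone
theorem toDigits_len_mono (b : Nat) : ∀ a : Nat, a ≤ b →
    (Nat.toDigits 10 a).length ≤ (Nat.toDigits 10 b).length := by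
  induction b using Nat.strong_induction_on with
  | _ b ih =>
    intro a hab
    rw [Nat.toDigits_eq_if (n := a) (by norm_num), Nat.toDigits_eq_if (n := b) (by norm_num)]
    split_ifs with ha hb hb
    · simp
    · have := @Nat.length_toDigits_pos 10 (b / 10)
      simp only [List.length_append, List.length_cons, List.length_nil]
      omega
    · omega
    · simp only [List.length_append, List.length_cons, List.length_nil,
        Nat.add_le_add_iff_right]
      exact ih (b / 10) (Nat.div_lt_self (by omega) (by norm_num)) (a / 10)
        (Nat.div_le_div_right hab)

-- equal decimal length: the digit strings compare like the numbers
theorem toDigits_lt_of_len_eq (b : Nat) : ∀ a : Nat, a < b →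
    (Nat.toDigits 10 a).length = (Nat.toDigits 10 b).length →
    Nat.toDigits 10 a < Nat.toDigits 10 b := by
  induction b using Nat.strong_induction_on with
  | _ b ih =>
    intro a hab hlen
    rw [Nat.toDigits_eq_if (n := a) (by norm_num), Nat.toDigits_eq_if (n := b) (by norm_num)] at *
    split_ifs at hlen ⊢ with ha hb hb
    · exact List.cons_lt_cons_iff.mpr (Or.inl (digitChar_lt a b ha hb hab))
    · have := @Nat.length_toDigits_pos 10 (b / 10)
      simp only [List.length_append, List.length_cons, List.length_nil] at hlen
      omega
    · omega
    · simp only [List.length_append, List.length_cons, List.length_nil,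
        Nat.add_right_cancel_iff] at hlen
      rcases Nat.lt_or_ge (a / 10) (b / 10) with hd | hd
      · exact list_lt_append_of_lt _ _ _ _
          (ih (b / 10) (Nat.div_lt_self (by omega) (by norm_num)) (a / 10) hd hlen) hlen
      · have hdeq : a / 10 = b / 10 := le_antisymm (Nat.div_le_div_right (le_of_lt hab)) hd
        have hmod : a % 10 < b % 10 := by omega
        rw [hdeq]
        exact list_lt_append_left _ _ _
          (List.cons_lt_cons_iff.mpr (Or.inl
            (digitChar_lt _ _ (Nat.mod_lt _ (by norm_num)) (Nat.mod_lt _ (by norm_num)) hmod)))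

-- the sort key of str(·) is strictly monotone on positive ints
theorem pvKey_toStr_mono (a b : Int) (ha : 0 ≤ a) (h : a < b) :
    pvKey (PySem.Int.toStr a) < pvKey (PySem.Int.toStr b) := by
  have hta : (PySem.Int.toStr a).toList = Nat.toDigits 10 a.toNat := by
    rw [PySem.Int.toList_toStr, PySem.Int.toChars, if_neg (by omega)]
  have htb : (PySem.Int.toStr b).toList = Nat.toDigits 10 b.toNat := by
    rw [PySem.Int.toList_toStr, PySem.Int.toChars, if_neg (by omega)]
  have hnat : a.toNat < b.toNat := by omega
  have hlen := toDigits_len_mono b.toNat a.toNat (le_of_lt hnat)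
  rw [pvKey, pvKey, Prod.Lex.lt_iff]
  simp only [ofLex_toLex, PySem.Str.len_eq, hta, htb]
  rcases Nat.lt_or_ge (Nat.toDigits 10 a.toNat).length (Nat.toDigits 10 b.toNat).length with hl | hl
  · exact Or.inl (by exact_mod_cast hl)
  · have hleq : (Nat.toDigits 10 a.toNat).length = (Nat.toDigits 10 b.toNat).length :=
      le_antisymm hlen hl
    refine Or.inr ⟨by exact_mod_cast hleq, ?_⟩
    rw [String.lt_iff_toList_lt, hta, htb]
    exact toDigits_lt_of_len_eq b.toNat a.toNat hnat hleq

theorem toStr_inj_pos (a b : Int) (ha : 0 ≤ a) (hb : 0 ≤ b)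
    (h : PySem.Int.toStr a = PySem.Int.toStr b) : a = b := by
  by_contra hne
  rcases lt_or_gt_of_ne hne with hlt | hlt
  · exact absurd (congrArg pvKey h) (ne_of_lt (pvKey_toStr_mono a b ha hlt))
  · exact absurd (congrArg pvKey h).symm (ne_of_lt (pvKey_toStr_mono b a hb hlt))

-- the port's hand-written tuple comparison is the strict key order
theorem tuple_gt_iff (s t : String) :
    (PySem.Str.len s < PySem.Str.len t ∨ (PySem.Str.len t = PySem.Str.len s ∧ s < t))
      ↔ pvKey s < pvKey t := by
  rw [pvKey, pvKey, Prod.Lex.lt_iff]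
  simp only [ofLex_toLex]
  constructor
  · rintro (h | ⟨h, h2⟩)
    · exact Or.inl h
    · exact Or.inr ⟨h.symm, h2⟩
  · rintro (h | ⟨h, h2⟩)
    · exact Or.inl h
    · exact Or.inr ⟨h.symm, h2⟩

-- the sorted-gap scan: on a strictly key-increasing list it returns the least free index ≥ i
theorem pickB_mex_spec (ts : List String) : ∀ i : Int,
    ts.Pairwise (fun a b => pvKey a < pvKey b) → 1 ≤ i →
    i ≤ pickB_mex ts i ∧ PySem.Int.toStr (pickB_mex ts i) ∉ ts ∧
      ∀ j : Int, i ≤ j → j < pickB_mex ts i → PySem.Int.toStr j ∈ ts := by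
  induction ts with
  | nil =>
      intro i _ _
      refine ⟨le_refl _, by simp [pickB_mex], ?_⟩
      intro j h1 h2
      simp [pickB_mex] at h2
      omega
  | cons t ts ih =>
      intro i hpw hi
      have hpw' : ts.Pairwise (fun a b => pvKey a < pvKey b) := hpw.of_cons
      have hhead : ∀ u ∈ ts, pvKey t < pvKey u := (List.pairwise_cons.mp hpw).1
      by_cases ht : t = PySem.Int.toStr i
      · -- t == str(i): advance to i+1
        obtain ⟨h1, h2, h3⟩ := ih (i + 1) hpw' (by omega)
        rw [pickB_mex, if_pos ht]
        refine ⟨by omega, ?_, ?_⟩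
        · intro hmem
          rcases List.mem_cons.mp hmem with heq | hmem'
          · have : i < pickB_mex ts (i + 1) := by omega
            have := pvKey_toStr_mono i (pickB_mex ts (i + 1)) (by omega) this
            rw [ht] at heq
            exact absurd (congrArg pvKey heq.symm) (ne_of_lt this)
          · exact h2 hmem'
        · intro j hj1 hj2
          by_cases hji : j = i
          · subst hji; rw [← ht]; exact List.mem_cons_self
          · exact List.mem_cons_of_mem _ (h3 j (by omega) hj2)
      · rw [pickB_mex, if_neg ht]
        by_cases hgt : PySem.Str.len (PySem.Int.toStr i) < PySem.Str.len t ∨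
            (PySem.Str.len t = PySem.Str.len (PySem.Int.toStr i) ∧ PySem.Int.toStr i < t)
        · -- break: str(i) is free
          rw [if_pos hgt]
          have hkey : pvKey (PySem.Int.toStr i) < pvKey t := (tuple_gt_iff _ _).mp hgt
          refine ⟨le_refl _, ?_, ?_⟩
          · intro hmem
            rcases List.mem_cons.mp hmem with heq | hmem'
            · exact ht heq.symm
            · exact absurd (congrArg pvKey rfl)
                (by
                  have := lt_trans hkey (hhead _ hmem')
                  exact fun hk => absurd (hk ▸ this) (lt_irrefl _))
          · intro j h1 h2; omega
        · -- key t < key str(i): skip t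
          rw [if_neg hgt]
          have hkle : pvKey t ≤ pvKey (PySem.Int.toStr i) := by
            rcases le_or_gt (pvKey t) (pvKey (PySem.Int.toStr i)) with h | h
            · exact h
            · exact absurd ((tuple_gt_iff _ _).mpr h) hgt
          have hklt : pvKey t < pvKey (PySem.Int.toStr i) :=
            lt_of_le_of_ne hkle (fun hk => ht (pvKey_inj _ _ hk))
          obtain ⟨h1, h2, h3⟩ := ih i hpw' hi
          have htne : ∀ j : Int, i ≤ j → t ≠ PySem.Int.toStr j := by
            intro j hj hcontra
            have : pvKey (PySem.Int.toStr i) ≤ pvKey (PySem.Int.toStr j) := by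
              rcases eq_or_lt_of_le hj with rfl | hlt
              · exact le_refl _
              · exact le_of_lt (pvKey_toStr_mono i j (by omega) hlt)
            rw [hcontra] at hklt
            exact absurd (lt_of_lt_of_le hklt this) (lt_irrefl _)
          refine ⟨h1, ?_, ?_⟩
          · intro hmem
            rcases List.mem_cons.mp hmem with heq | hmem'
            · exact htne _ h1 heq.symm
            · exact h2 hmem'
          · intro j hj1 hj2
            exact List.mem_cons_of_mem _ (h3 j hj1 hj2)

-- A's while loop returns base ++ str(i0) when i0 is the first free index at or after index
theorem pickA_while_eq (base : String) (existing : List String) (i0 : Nat)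
    (hfree : ¬ (base ++ PySem.Int.toStr (i0 : Int)) ∈ existing)
    (htaken : ∀ j : Nat, 1 ≤ j → j < i0 → (base ++ PySem.Int.toStr (j : Int)) ∈ existing) :
    ∀ fuel index : Nat, 1 ≤ index → index ≤ i0 → i0 ≤ index + fuel →
      pickA_while base existing fuel index = base ++ PySem.Int.toStr (i0 : Int) := by
  intro fuel
  induction fuel with
  | zero =>
      intro index h1 h2 h3
      have : index = i0 := by omega
      subst this; rfl
  | succ fuel ih =>
      intro index h1 h2 h3
      by_cases hidx : index = i0
      · subst hidx
        simp [pickA_while]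
        intro hmem
        exact absurd hmem hfree
      · have hc : PySem.Set.contains existing (base ++ PySem.Int.toStr (index : Int)) = true :=
          (PySem.Set.contains_iff _ _).mpr (htaken index h1 (by omega))
        simp only [pickA_while, hc, Bool.not_true, Bool.false_eq_true, if_false]
        exact ih (index + 1) (by omega) (by omega) (by omega)

-- a nodup list contained in another is no longer than it
theorem nodup_subset_length {α : Type} [DecidableEq α] (l l' : List α)
    (h : l.Nodup) (hs : l ⊆ l') : l.length ≤ l'.length := by
  calc l.length = l.toFinset.card := (List.toFinset_card_of_nodup h).symm
  _ ≤ l'.toFinset.card := Finset.card_le_card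
        (by intro x hx; simp only [List.mem_toFinset] at *; exact hs hx)
  _ ≤ l'.length := l'.toFinset_card_le

-- ===== VERDICT (by name: the statement is the Claim_ definition above) =====
theorem pick_unique_prefix_py_spec : Claim_equal_pick_unique_prefix_py := by
  intro candidates existing _
  unfold Spec_pick_unique_prefix_py pick_unique_prefix_py pick_unique_prefix_py_alt
  rw [pickA_for_eq_filter]
  cases hfilt : candidates.filter (fun c => !(PySem.Set.contains existing c)) with
  | cons c cs => rfl
  | nil =>
      simp only [List.head?_nil]
      set base := (match candidates with | [] => "RCP" | c :: _ => c) with hbase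
      rw [sorted2_eq_sorted]
      set tails := PySem.List.sorted (PySem.Set.ofList (pickB_suffixes base existing))
        (fun t => toLex (PySem.Str.len t, t)) false with htails
      -- tails is strictly increasing in pvKey and without duplicates
      have hpw_le : tails.Pairwise (fun a b => pvKey a ≤ pvKey b) := by
        have := PySem.List.sorted_pairwise (PySem.Set.ofList (pickB_suffixes base existing))
          (fun t => toLex (PySem.Str.len t, t))
        exact this
      have hnodup : tails.Nodup :=
        ((PySem.List.sorted_perm _ _ _).nodup_iff).mpr
          (PySem.Set.nodup_ofList _)
      have hpw : tails.Pairwise (fun a b => pvKey a < pvKey b) := by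
        have hand := hpw_le.and hnodup
        exact hand.imp (fun {a b} h => lt_of_le_of_ne h.1 (fun hk => h.2 (pvKey_inj _ _ hk)))
      have hmem : ∀ t, t ∈ tails ↔ (base ++ t) ∈ existing := by
        intro t
        rw [htails, PySem.List.mem_sorted, PySem.Set.mem_ofList]
        exact mem_suffixes_iff base existing t
      obtain ⟨h1, h2, h3⟩ := pickB_mex_spec tails 1 hpw (le_refl 1)
      set r := pickB_mex tails 1 with hr
      have hr1 : 1 ≤ r := h1
      set n0 := r.toNat with hn0
      have hrn : (n0 : Int) = r := by omega
      -- bound: n0 - 1 strings str(1..n0-1) are distinct members of tails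
      have hsub : ((List.range (n0 - 1)).map
          (fun k : Nat => PySem.Int.toStr ((k : Int) + 1))) ⊆ tails := by
        intro x hx
        rw [List.mem_map] at hx
        obtain ⟨k, hk, rfl⟩ := hx
        rw [List.mem_range] at hk
        exact h3 ((k : Int) + 1) (by omega) (by omega)
      have hmapnodup : ((List.range (n0 - 1)).map
          (fun k : Nat => PySem.Int.toStr ((k : Int) + 1))).Nodup := by
        refine List.Nodup.map ?_ List.nodup_range
        intro a b hab
        have := toStr_inj_pos ((a : Int) + 1) ((b : Int) + 1) (by omega) (by omega) hab
        omega
      have hbound : n0 - 1 ≤ existing.length := by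
        have h1' := nodup_subset_length _ _ hmapnodup hsub
        rw [List.length_map, List.length_range] at h1'
        have h2' : tails.length ≤ existing.length := by
          rw [htails, PySem.List.length_sorted]
          calc (PySem.Set.ofList (pickB_suffixes base existing)).length
              ≤ (pickB_suffixes base existing).length := PySem.Set.length_ofList_le _
          _ ≤ existing.length := by
              rw [pickB_suffixes, List.length_map]
              exact List.length_filter_le _ _
        omega
      -- A's while loop lands on the same index
      have hA : pickA_while base existing (existing.length + 1) 1
          = base ++ PySem.Int.toStr ((n0 : Nat) : Int) := by
        apply pickA_while_eq base existing n0
        · rw [hrn, ← hmem]; exact h2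
        · intro j hj1 hj2
          rw [← hmem]
          exact h3 (j : Int) (by omega) (by omega)
        · omega
        · omega
        · omega
      rw [hA, hrn]
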